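-- pv_equiv track=rewrite | github.com/huggin/gfg | combinatorics/special_number.py | countOfSpeacialNo
-- ===== SOURCE A (Python) =====
-- def countOfSpeacialNo(n, b):
--     # Code here
--     if n == 1:
--         return b
--     if n == 2:
--         return b
--     if n == 3:
--         return b * b
--
--     ans = 0
--     if n <= 5:
--         cnt = [0] * 2 * b
--         for i in range(b):
--             for j in range(b):
--                 cnt[i + j] += 1
--         for i in range(len(cnt)):
--             ans += cnt[i] * cnt[i]
--         if n == 5:
--             ans *= b
--         return ans
--
--     cnt = [0] * 3 * b
--     for i in range(b):
--         for j in range(b):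
--             for k in range(b):
--                 cnt[i + j + k] += 1
--     ans = 0
--     for i in range(len(cnt)):
--         ans += cnt[i] * cnt[i]
--     return ans
-- ===== SOURCE B (Python) =====
-- def countOfSpeacialNo(n, b):
--     # O(b)/O(b^2) via closed-form pair-sum counts instead of building count arrays in O(b^2)/O(b^3)
--     if n == 1 or n == 2:
--         return b
--     if n == 3:
--         return b * b
--
--     def c2(s):
--         # number of pairs (i, j) in [0, b)^2 with i + j == s
--         return max(0, min(b, s + 1) - max(0, s + 1 - b))
--
--     if n <= 5:
--         ans = sum(c2(s) * c2(s) for s in range(2 * b))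
--         return ans * b if n == 5 else ans
--
--     ans = 0
--     for s in range(3 * b):
--         t = sum(c2(s - i) for i in range(b))
--         ans += t * t
--     return ans
-- ===== Notes on version B (the rewrite author's own statement) =====
-- stated objective: faster
-- what changed: B replaces A's construction of the sum-count array by repeated in-place increments (double/triple nested loops over all tuples) with a closed-form count of pairs summing to s, summing its squares directly (and one convolution pass for the triple case).
import Mathlib
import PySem

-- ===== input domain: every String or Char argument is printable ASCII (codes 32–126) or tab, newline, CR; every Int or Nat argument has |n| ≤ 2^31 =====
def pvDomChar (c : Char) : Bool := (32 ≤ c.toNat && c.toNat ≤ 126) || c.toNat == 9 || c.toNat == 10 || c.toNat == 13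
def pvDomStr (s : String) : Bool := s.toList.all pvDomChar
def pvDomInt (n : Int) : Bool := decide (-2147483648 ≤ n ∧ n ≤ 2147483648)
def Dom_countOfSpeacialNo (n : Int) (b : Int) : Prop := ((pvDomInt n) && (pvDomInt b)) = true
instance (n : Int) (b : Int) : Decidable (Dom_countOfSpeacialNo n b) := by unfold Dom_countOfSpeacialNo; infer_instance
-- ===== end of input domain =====

-- B replaces A's O(b^2)/O(b^3) count-array construction with a closed-form pair-sum count,
-- summing its squares directly (same return value; A mutates only its local list).

-- ===== PORT A =====
-- cnt[i+j] (resp. cnt[i+j+k]) is always in range (i,j,k ∈ [0,b), len cnt = 2b resp. 3b),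
-- so pyGetD/pySetD are exact here (no IndexError is reachable).
def countOfSpeacialNo (n : Int) (b : Int) : Int :=
  if n = 1 then b
  else if n = 2 then b
  else if n = 3 then b * b
  else if n ≤ 5 then
    let cnt0 := List.replicate (2 * b).toNat (0 : Int)
    let cnt := (PySem.List.pyRange 0 b 1).foldl (fun c i =>
        (PySem.List.pyRange 0 b 1).foldl (fun c j =>
          PySem.List.pySetD c (i + j) (PySem.List.pyGetD c (i + j) 0 + 1)) c) cnt0
    let ans := (PySem.List.pyRange 0 (PySem.List.len cnt) 1).foldl
        (fun a i => a + PySem.List.pyGetD cnt i 0 * PySem.List.pyGetD cnt i 0) 0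
    if n = 5 then ans * b else ans
  else
    let cnt0 := List.replicate (3 * b).toNat (0 : Int)
    let cnt := (PySem.List.pyRange 0 b 1).foldl (fun c i =>
        (PySem.List.pyRange 0 b 1).foldl (fun c j =>
          (PySem.List.pyRange 0 b 1).foldl (fun c k =>
            PySem.List.pySetD c (i + j + k) (PySem.List.pyGetD c (i + j + k) 0 + 1)) c) c) cnt0
    (PySem.List.pyRange 0 (PySem.List.len cnt) 1).foldl
        (fun a i => a + PySem.List.pyGetD cnt i 0 * PySem.List.pyGetD cnt i 0) 0

-- ===== PORT B =====
-- number of pairs (i, j) in [0, b)^2 with i + j = s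
def pvC2 (b s : Int) : Int := max 0 (min b (s + 1) - max 0 (s + 1 - b))

def countOfSpeacialNo_alt (n : Int) (b : Int) : Int :=
  if n = 1 ∨ n = 2 then b
  else if n = 3 then b * b
  else if n ≤ 5 then
    let ans := ((PySem.List.pyRange 0 (2 * b) 1).map (fun s => pvC2 b s * pvC2 b s)).sum
    if n = 5 then ans * b else ans
  else
    (PySem.List.pyRange 0 (3 * b) 1).foldl (fun a s =>
      let t := ((PySem.List.pyRange 0 b 1).map (fun i => pvC2 b (s - i))).sum
      a + t * t) 0

-- ===== PRECONDITION & SPEC =====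
def Spec_countOfSpeacialNo (n : Int) (b : Int) (out : Int) : Prop := out = countOfSpeacialNo_alt n b
instance (n : Int) (b : Int) (out : Int) : Decidable (Spec_countOfSpeacialNo n b out) := by unfold Spec_countOfSpeacialNo; infer_instance

-- ===== CLAIM (what is proved, stated in full; the proofs are below) =====
def Claim_equal_countOfSpeacialNo : Prop := ∀ (n : Int) (b : Int), Dom_countOfSpeacialNo n b → Spec_countOfSpeacialNo n b (countOfSpeacialNo n b)

-- ===== LEMMAS AND PROOFS =====

theorem pvSumInd (m : Nat) : ∀ (a lo hi : Int),
    ((PySem.List.pyRange a (a + (m : Int)) 1).map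
      (fun i => if lo ≤ i ∧ i < hi then (1 : Int) else 0)).sum
    = max 0 (min (a + (m : Int)) hi - max a lo) := by
  induction m with
  | zero =>
    intro a lo hi
    rw [PySem.List.pyRange_one_eq_nil (by omega)]
    simp [max_def, min_def]
    omega
  | succ k ih =>
    intro a lo hi
    rw [show a + ((k + 1 : Nat) : Int) = (a + (k:Int)) + 1 by push_cast; ring]
    rw [PySem.List.pyRange_one_succ_right (by omega)]
    rw [List.map_append, List.sum_append, ih]
    simp only [List.map_cons, List.map_nil, List.sum_cons, List.sum_nil]
    by_cases h1 : lo ≤ a + (k:Int) <;> by_cases h2 : a + (k:Int) < hi <;>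
      simp [h1, h2, max_def, min_def] <;> split_ifs <;> omega


theorem pvSumInd0 (b lo hi : Int) :
    ((PySem.List.pyRange 0 b 1).map
      (fun i => if lo ≤ i ∧ i < hi then (1 : Int) else 0)).sum
    = max 0 (min b hi - max 0 lo) := by
  by_cases hb : 0 ≤ b
  · have := pvSumInd b.toNat 0 lo hi
    rw [show ((b.toNat : Nat) : Int) = b by omega] at this
    simpa using this
  · rw [PySem.List.pyRange_one_eq_nil (by omega)]
    simp [max_def, min_def]
    split_ifs <;> omega

theorem pvFoldPointwise {α : Type} (L : Nat) (F : List Int → α → List Int) (δ : α → Nat → Int)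
    (xs : List α)
    (h : ∀ c x, x ∈ xs → c.length = L →
        (F c x).length = L ∧ ∀ s, s < L → (F c x).getD s 0 = c.getD s 0 + δ x s) :
    ∀ c, c.length = L → (xs.foldl F c).length = L ∧
      ∀ s, s < L → (xs.foldl F c).getD s 0 = c.getD s 0 + (xs.map (fun x => δ x s)).sum := by
  induction xs with
  | nil => intro c hc; simpa using hc
  | cons x xs ih =>
    intro c hc
    have hx := h c x (by simp) hc
    have ih' := ih (fun c y hy hcl => h c y (by simp [hy]) hcl) (F c x) hx.1
    refine ⟨ih'.1, fun s hs => ?_⟩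
    simp only [List.foldl_cons, List.map_cons, List.sum_cons]
    rw [ih'.2 s hs, hx.2 s hs]; ring

theorem pvStep (c : List Int) (t : Int) (h0 : 0 ≤ t) (hl : t < (c.length : Int)) :
    (PySem.List.pySetD c t (PySem.List.pyGetD c t 0 + 1)).length = c.length ∧
    ∀ s, s < c.length → (PySem.List.pySetD c t (PySem.List.pyGetD c t 0 + 1)).getD s 0
      = c.getD s 0 + (if t = (s : Int) then 1 else 0) := by
  rw [PySem.List.pySetD_of_nonneg _ _ h0, PySem.List.pyGetD_eq_getElem _ _ h0 hl]
  refine ⟨by simp, fun s hs => ?_⟩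
  rw [List.getD_eq_getElem _ _ (by simpa using hs),
      List.getD_eq_getElem _ _ hs]
  by_cases he : t.toNat = s
  · subst he
    rw [List.getElem_set_self (by simp; omega), if_pos (by omega)]
  · rw [List.getElem_set_ne (by omega)]
    rw [if_neg (by omega)]
    ring

theorem pvInner (b : Int) (L : Nat) (off : Int) (h0 : 0 ≤ off)
    (hub : off + b ≤ (L : Int)) :
    ∀ c : List Int, c.length = L →
      ((PySem.List.pyRange 0 b 1).foldl (fun c k =>
          PySem.List.pySetD c (off + k) (PySem.List.pyGetD c (off + k) 0 + 1)) c).length = L ∧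
      ∀ s, s < L → ((PySem.List.pyRange 0 b 1).foldl (fun c k =>
          PySem.List.pySetD c (off + k) (PySem.List.pyGetD c (off + k) 0 + 1)) c).getD s 0
        = c.getD s 0 + (if off ≤ (s : Int) ∧ (s : Int) < off + b then 1 else 0) := by
  intro c hc
  have H := pvFoldPointwise L
      (fun c k => PySem.List.pySetD c (off + k) (PySem.List.pyGetD c (off + k) 0 + 1))
      (fun k s => if off + k = (s : Int) then (1 : Int) else 0)
      (PySem.List.pyRange 0 b 1)
      (fun c k hk hcl => by
        have hm := (PySem.List.mem_pyRange_one.mp hk)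
        have := pvStep c (off + k) (by omega) (by rw [hcl]; omega)
        exact ⟨this.1.trans hcl, fun s hs => this.2 s (by omega)⟩)
      c hc
  refine ⟨H.1, fun s hs => ?_⟩
  rw [H.2 s hs]
  congr 1
  have : ((PySem.List.pyRange 0 b 1).map (fun k => if off + k = (s : Int) then (1 : Int) else 0))
      = ((PySem.List.pyRange 0 b 1).map
          (fun k => if (s : Int) - off ≤ k ∧ k < (s : Int) - off + 1 then (1 : Int) else 0)) := by
    refine List.map_congr_left (fun k hk => ?_)
    by_cases h : off + k = (s : Int)
    · rw [if_pos h, if_pos (by omega)]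
    · rw [if_neg h, if_neg (by omega)]
  rw [this, pvSumInd0]
  simp only [max_def, min_def]
  split_ifs <;> omega

theorem pvCnt2 (b : Int) :
    (PySem.List.pyRange 0 b 1).foldl (fun c i =>
        (PySem.List.pyRange 0 b 1).foldl (fun c j =>
          PySem.List.pySetD c (i + j) (PySem.List.pyGetD c (i + j) 0 + 1)) c)
      (List.replicate (2 * b).toNat (0 : Int))
    = (PySem.List.pyRange 0 (2 * b) 1).map (fun s => pvC2 b s) := by
  by_cases hb : b ≤ 0
  · rw [PySem.List.pyRange_one_eq_nil (by omega), PySem.List.pyRange_one_eq_nil (by omega)]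
    simp [show (2*b).toNat = 0 by omega]
  · have H := pvFoldPointwise (2 * b).toNat
        (fun c i => (PySem.List.pyRange 0 b 1).foldl (fun c j =>
            PySem.List.pySetD c (i + j) (PySem.List.pyGetD c (i + j) 0 + 1)) c)
        (fun i s => if i ≤ (s : Int) ∧ (s : Int) < i + b then (1 : Int) else 0)
        (PySem.List.pyRange 0 b 1)
        (fun c i hi hcl => by
          have hm := PySem.List.mem_pyRange_one.mp hi
          exact pvInner b (2 * b).toNat i (by omega) (by omega) c hcl)
        (List.replicate (2 * b).toNat (0 : Int)) (by simp)
    refine List.ext_getElem ?_ (fun s hs1 hs2 => ?_)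
    · rw [H.1]; simp [PySem.List.length_pyRange_one]
    · have hs : s < (2 * b).toNat := by rwa [H.1] at hs1
      rw [← List.getD_eq_getElem _ (0 : Int) hs1, H.2 s hs]
      have : ((PySem.List.pyRange 0 b 1).map
            (fun i => if i ≤ (s : Int) ∧ (s : Int) < i + b then (1 : Int) else 0))
          = ((PySem.List.pyRange 0 b 1).map
            (fun i => if (s : Int) + 1 - b ≤ i ∧ i < (s : Int) + 1 then (1 : Int) else 0)) := by
        refine List.map_congr_left (fun i hi => ?_)
        by_cases h : i ≤ (s : Int) ∧ (s : Int) < i + b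
        · rw [if_pos h, if_pos (by omega)]
        · rw [if_neg h, if_neg (by omega)]
      rw [this, pvSumInd0]
      simp [PySem.List.getElem_pyRange_one, pvC2]

theorem pvMid (b : Int) (L : Nat) (i : Int) (h0 : 0 ≤ i) (hub : i + 2 * b ≤ (L : Int)) :
    ∀ c : List Int, c.length = L →
      ((PySem.List.pyRange 0 b 1).foldl (fun c j =>
          (PySem.List.pyRange 0 b 1).foldl (fun c k =>
            PySem.List.pySetD c (i + j + k) (PySem.List.pyGetD c (i + j + k) 0 + 1)) c) c).length = L ∧
      ∀ s, s < L → ((PySem.List.pyRange 0 b 1).foldl (fun c j =>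
          (PySem.List.pyRange 0 b 1).foldl (fun c k =>
            PySem.List.pySetD c (i + j + k) (PySem.List.pyGetD c (i + j + k) 0 + 1)) c) c).getD s 0
        = c.getD s 0 + pvC2 b ((s : Int) - i) := by
  intro c hc
  have H := pvFoldPointwise L
      (fun c j => (PySem.List.pyRange 0 b 1).foldl (fun c k =>
          PySem.List.pySetD c (i + j + k) (PySem.List.pyGetD c (i + j + k) 0 + 1)) c)
      (fun j s => if i + j ≤ (s : Int) ∧ (s : Int) < i + j + b then (1 : Int) else 0)
      (PySem.List.pyRange 0 b 1)
      (fun c j hj hcl => by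
        have hm := PySem.List.mem_pyRange_one.mp hj
        exact pvInner b L (i + j) (by omega) (by omega) c hcl)
      c hc
  refine ⟨H.1, fun s hs => ?_⟩
  rw [H.2 s hs]
  congr 1
  have : ((PySem.List.pyRange 0 b 1).map
        (fun j => if i + j ≤ (s : Int) ∧ (s : Int) < i + j + b then (1 : Int) else 0))
      = ((PySem.List.pyRange 0 b 1).map
        (fun j => if (s : Int) - i + 1 - b ≤ j ∧ j < (s : Int) - i + 1 then (1 : Int) else 0)) := by
    refine List.map_congr_left (fun j hj => ?_)
    by_cases h : i + j ≤ (s : Int) ∧ (s : Int) < i + j + b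
    · rw [if_pos h, if_pos (by omega)]
    · rw [if_neg h, if_neg (by omega)]
  rw [this, pvSumInd0]
  simp [pvC2]

theorem pvCnt3 (b : Int) :
    (PySem.List.pyRange 0 b 1).foldl (fun c i =>
        (PySem.List.pyRange 0 b 1).foldl (fun c j =>
          (PySem.List.pyRange 0 b 1).foldl (fun c k =>
            PySem.List.pySetD c (i + j + k) (PySem.List.pyGetD c (i + j + k) 0 + 1)) c) c)
      (List.replicate (3 * b).toNat (0 : Int))
    = (PySem.List.pyRange 0 (3 * b) 1).map
        (fun s => ((PySem.List.pyRange 0 b 1).map (fun i => pvC2 b (s - i))).sum) := by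
  by_cases hb : b ≤ 0
  · rw [PySem.List.pyRange_one_eq_nil (b := b) (by omega),
        PySem.List.pyRange_one_eq_nil (b := 3 * b) (by omega)]
    simp [show (3*b).toNat = 0 by omega]
  · have H := pvFoldPointwise (3 * b).toNat
        (fun c i => (PySem.List.pyRange 0 b 1).foldl (fun c j =>
            (PySem.List.pyRange 0 b 1).foldl (fun c k =>
              PySem.List.pySetD c (i + j + k) (PySem.List.pyGetD c (i + j + k) 0 + 1)) c) c)
        (fun i s => pvC2 b ((s : Int) - i))
        (PySem.List.pyRange 0 b 1)
        (fun c i hi hcl => by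
          have hm := PySem.List.mem_pyRange_one.mp hi
          exact pvMid b (3 * b).toNat i (by omega) (by omega) c hcl)
        (List.replicate (3 * b).toNat (0 : Int)) (by simp)
    refine List.ext_getElem ?_ (fun s hs1 hs2 => ?_)
    · rw [H.1]; simp [PySem.List.length_pyRange_one]
    · have hs : s < (3 * b).toNat := by rwa [H.1] at hs1
      rw [← List.getD_eq_getElem _ (0 : Int) hs1, H.2 s hs]
      simp [PySem.List.getElem_pyRange_one]

theorem pvAns (m : Int) (f : Int → Int) :
    (PySem.List.pyRange 0 (PySem.List.len ((PySem.List.pyRange 0 m 1).map f)) 1).foldl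
      (fun a i => a + PySem.List.pyGetD ((PySem.List.pyRange 0 m 1).map f) i 0
                    * PySem.List.pyGetD ((PySem.List.pyRange 0 m 1).map f) i 0) 0
    = ((PySem.List.pyRange 0 m 1).map (fun s => f s * f s)).sum := by
  rw [PySem.List.foldl_pyRange_zero_pyGetD ((PySem.List.pyRange 0 m 1).map f) 0
      (fun a x => a + x * x) 0]
  rw [PySem.List.foldl_add ((PySem.List.pyRange 0 m 1).map f) (fun x => x * x) 0]
  rw [List.map_map, zero_add]
  rfl

-- ===== VERDICT (by name: the statement is the Claim_ definition above) =====
theorem countOfSpeacialNo_spec : Claim_equal_countOfSpeacialNo := by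
  intro n b _
  unfold Spec_countOfSpeacialNo
  simp only [countOfSpeacialNo, countOfSpeacialNo_alt]
  rw [pvCnt2 b, pvCnt3 b, pvAns (2 * b) (fun s => pvC2 b s),
      pvAns (3 * b) (fun s => ((PySem.List.pyRange 0 b 1).map (fun i => pvC2 b (s - i))).sum),
      PySem.List.foldl_add (PySem.List.pyRange 0 (3 * b) 1)
        (fun s => ((PySem.List.pyRange 0 b 1).map (fun i => pvC2 b (s - i))).sum
                * ((PySem.List.pyRange 0 b 1).map (fun i => pvC2 b (s - i))).sum) 0,
      zero_add]
  split_ifs <;> first | rfl | omega
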